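-- pv_equiv track=rewrite | github.com/Khvaaan/Monopoly_game | Monopoly.py | double_max
-- ===== SOURCE A (Python) =====
-- def double_max(arr):
-- 	""" выводит результат: есть ли в массиве два одинаковых максимальных значения?"""
--
-- 	doubleMax = 0
-- 	maxim = 0
-- 	for i in arr:
-- 		if i > maxim:
-- 			maxim = i
-- 			doubleMax = 0
--
-- 		elif i == maxim:
-- 			doubleMax = 1
--
-- 	return doubleMax
-- ===== SOURCE B (Python) =====
-- def double_max(arr):
--     vals = [0, *arr]
--     m = max(vals)
--     return 1 if vals.count(m) >= 2 else 0
-- ===== Notes on version B (the rewrite author's own statement) =====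
-- stated objective: simpler
-- what changed: Replaces the single-pass running-max-with-duplicate-flag loop by two declarative passes: seed a list [0,*arr] (mirroring A's maxim=0 start), take its max, and return whether that max occurs at least twice.
import Mathlib
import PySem

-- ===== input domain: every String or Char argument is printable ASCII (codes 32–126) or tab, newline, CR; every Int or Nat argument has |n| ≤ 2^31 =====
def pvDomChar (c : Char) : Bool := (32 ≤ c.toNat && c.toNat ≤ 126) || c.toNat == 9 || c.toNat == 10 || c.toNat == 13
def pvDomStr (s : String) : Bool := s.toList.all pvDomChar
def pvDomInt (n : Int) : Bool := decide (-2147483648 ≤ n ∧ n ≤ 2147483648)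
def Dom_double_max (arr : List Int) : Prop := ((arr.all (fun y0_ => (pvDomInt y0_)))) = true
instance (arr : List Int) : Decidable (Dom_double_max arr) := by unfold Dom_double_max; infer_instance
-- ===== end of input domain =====

-- B replaces A's single-pass running-max + flag loop by two declarative passes
-- (max of the 0-seeded list, then a count of that max); objective: simpler.

-- ===== PORT A =====
def double_max (arr : List Int) : Int :=
  (arr.foldl (fun (st : Int × Int) i =>
      if i > st.2 then (0, i)
      else if i = st.2 then (1, st.2)
      else st)
    (0, 0)).1

-- ===== PORT B =====
def double_max_alt (arr : List Int) : Int :=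
  let vals : List Int := 0 :: arr
  match PySem.List.max? vals (fun y => y) with
  | some m => if 2 ≤ PySem.List.count vals m then 1 else 0
  | none => 0   -- unreachable: vals is nonempty

-- ===== PRECONDITION & SPEC =====
def Spec_double_max (arr : List Int) (out : Int) : Prop := out = double_max_alt arr
instance (arr : List Int) (out : Int) : Decidable (Spec_double_max arr out) := by unfold Spec_double_max; infer_instance

-- ===== CLAIM (what is proved, stated in full; the proofs are below) =====
def Claim_equal_double_max : Prop := ∀ (arr : List Int), Dom_double_max arr → Spec_double_max arr (double_max arr)

-- ===== LEMMAS AND PROOFS =====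

-- The loop invariant: after processing prefix p, A's state is
-- (the dup flag of the 0-seeded prefix, the running max of the 0-seeded prefix).
theorem double_max_invariant (rest : List Int) : ∀ (p : List Int),
    rest.foldl (fun (st : Int × Int) i =>
        if i > st.2 then (0, i)
        else if i = st.2 then (1, st.2)
        else st)
      ((if 2 ≤ (0 :: p).count (p.foldl max 0) then (1 : Int) else 0), p.foldl max 0)
    = ((if 2 ≤ (0 :: (p ++ rest)).count ((p ++ rest).foldl max 0) then (1 : Int) else 0),
       (p ++ rest).foldl max 0) := by
  induction rest with
  | nil => intro p; simp
  | cons i rest ih =>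
    intro p
    have hstep :
        (if i > p.foldl max 0 then ((0 : Int), i)
         else if i = p.foldl max 0 then ((1 : Int), p.foldl max 0)
         else ((if 2 ≤ (0 :: p).count (p.foldl max 0) then (1 : Int) else 0), p.foldl max 0))
        = ((if 2 ≤ (0 :: (p ++ [i])).count ((p ++ [i]).foldl max 0) then (1 : Int) else 0),
           (p ++ [i]).foldl max 0) := by
      have hM : (p ++ [i]).foldl max 0 = max (p.foldl max 0) i := by
        simp [List.foldl_append]
      rcases lt_trichotomy (p.foldl max 0) i with hlt | heq | hgt
      · -- i strictly bigger: new max i, i not in the seeded prefix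
        have hmax : (p ++ [i]).foldl max 0 = i := by omega
        have hle := PySem.List.le_foldl_max p (0 : Int)
        have hnot : (((0 : Int) :: p).count i) = 0 := by
          rw [List.count_eq_zero]
          intro hmem
          rcases List.mem_cons.mp hmem with h0 | hp
          · omega
          · have := hle.2 i hp; omega
        have hcount : ((0 : Int) :: (p ++ [i])).count i = 1 := by
          have : (0 : Int) :: (p ++ [i]) = ((0 : Int) :: p) ++ [i] := by simp
          rw [this, List.count_append, hnot]
          simp
        simp only [hmax, hcount]
        rw [if_pos hlt]
        norm_num
      · -- i equals the running max: the max is already in the seeded prefix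
        have hmax : (p ++ [i]).foldl max 0 = i := by omega
        have hmem : p.foldl max 0 ∈ (0 : Int) :: p := by
          rcases PySem.List.foldl_max_mem p (0 : Int) with h | h
          · rw [h]; exact List.mem_cons_self
          · exact List.mem_cons_of_mem _ h
        have hcount : 2 ≤ ((0 : Int) :: (p ++ [i])).count i := by
          have h1 : 1 ≤ ((0 : Int) :: p).count i := List.one_le_count_iff.mpr (heq ▸ hmem)
          have he : (0 : Int) :: (p ++ [i]) = ((0 : Int) :: p) ++ [i] := by simp
          rw [he, List.count_append]
          have h2 : List.count i [i] = 1 := by simp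
          omega
        rw [if_neg (by omega), if_pos heq.symm, hmax, if_pos hcount, heq]
      · -- i strictly smaller: nothing changes
        have hmax : (p ++ [i]).foldl max 0 = p.foldl max 0 := by omega
        have hcount : ((0 : Int) :: (p ++ [i])).count (p.foldl max 0)
            = ((0 : Int) :: p).count (p.foldl max 0) := by
          have : (0 : Int) :: (p ++ [i]) = ((0 : Int) :: p) ++ [i] := by simp
          rw [this, List.count_append]
          have : [i].count (p.foldl max 0) = 0 := by
            rw [List.count_eq_zero]; intro h; simp at h; omega
          omega
        rw [if_neg (by omega), if_neg (by omega), hmax, hcount]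
    calc (i :: rest).foldl _ _
        = rest.foldl (fun (st : Int × Int) i =>
            if i > st.2 then (0, i)
            else if i = st.2 then (1, st.2)
            else st)
          ((if 2 ≤ (0 :: (p ++ [i])).count ((p ++ [i]).foldl max 0) then (1 : Int) else 0),
           (p ++ [i]).foldl max 0) := by
          simp only [List.foldl_cons]; rw [← hstep]
      _ = _ := by rw [ih (p ++ [i])]; simp

-- ===== VERDICT (by name: the statement is the Claim_ definition above) =====
theorem double_max_spec : Claim_equal_double_max := by
  intro arr _
  unfold Spec_double_max double_max double_max_alt
  have h := double_max_invariant arr []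
  simp only [List.nil_append] at h
  rw [show (List.foldl max 0 ([] : List Int)) = (0 : Int) from rfl] at h
  rw [show ((if 2 ≤ ((0 : Int) :: ([] : List Int)).count 0 then (1:Int) else 0) = 0) by simp] at h
  rw [h]
  simp only [PySem.List.max?_id_cons, PySem.List.count]
  rfl
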